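-- pv_equiv track=rewrite | github.com/michelcrypt4d4mus/epstein_text_messages | epstein_files/output/rich.py | wrap_in_markup_style
-- ===== SOURCE A (Python) =====
-- def wrap_in_markup_style(msg: str, style: str | None = None) -> str:
--     if style is None or len(style.strip()) == 0:
--         return msg
--
--     modifier = ''
--
--     for style_word in style.split():
--         if style_word == 'on':
--             modifier = style_word
--             continue
--
--         style = f"{modifier} {style_word}".strip()
--         msg = f"[{style}]{msg}[/{style}]"
--         modifier = ''
--
--     return msg
-- ===== SOURCE B (Python) =====
-- def wrap_in_markup_style(msg: str, style: str | None = None) -> str: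
--     if style is None or len(style.strip()) == 0:
--         return msg
--     tags = []
--     pending_on = False
--     for word in style.split():
--         if word == 'on':
--             pending_on = True
--         else:
--             tags.append('on ' + word if pending_on else word)
--             pending_on = False
--     opens = ''.join(f'[{t}]' for t in reversed(tags))
--     closes = ''.join(f'[/{t}]' for t in tags)
--     return opens + msg + closes
-- ===== Notes on version B (the rewrite author's own statement) =====
-- stated objective: simpler
-- what changed: A fuses parsing and wrapping in one loop that rebuilds msg each iteration with per-tag .strip(); B first parses style.split() into a tag list with a pending_on flag (no strip needed) and then renders the result once as open-tags + msg + close-tags.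
import Mathlib
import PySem

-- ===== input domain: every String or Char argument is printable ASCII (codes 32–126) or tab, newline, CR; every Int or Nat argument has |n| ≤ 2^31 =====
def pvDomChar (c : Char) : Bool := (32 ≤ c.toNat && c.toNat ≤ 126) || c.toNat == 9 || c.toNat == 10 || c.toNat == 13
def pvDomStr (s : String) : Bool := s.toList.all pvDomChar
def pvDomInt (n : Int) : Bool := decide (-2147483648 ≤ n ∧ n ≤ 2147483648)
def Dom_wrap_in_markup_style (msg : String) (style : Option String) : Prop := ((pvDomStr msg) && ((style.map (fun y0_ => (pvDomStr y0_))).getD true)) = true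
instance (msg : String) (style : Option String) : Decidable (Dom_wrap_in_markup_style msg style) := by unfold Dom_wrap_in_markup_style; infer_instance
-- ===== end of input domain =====

-- B splits A's fused loop into a parse phase (list of tags) and a render phase (open-tags ++ msg ++ close-tags); objective: simpler decomposition, not faster.

-- ===== PORT A =====
-- A's for-loop with state (modifier, msg); tag = (modifier + ' ' + word).strip()
def wrapA_loop : List (List Char) → List Char → List Char → List Char
  | [], _, msg => msg
  | w :: ws, modifier, msg =>
    if w = ['o', 'n'] then wrapA_loop ws w msg
    else
      let st := PySem.Chars.strip (modifier ++ [' '] ++ w)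
      wrapA_loop ws [] (['['] ++ st ++ [']'] ++ msg ++ ['[', '/'] ++ st ++ [']'])

def wrap_in_markup_style (msg : String) (style : Option String) : String :=
  match style with
  | none => msg
  | some s =>
    if (PySem.Chars.strip s.toList).length = 0 then msg
    else String.ofList (wrapA_loop (PySem.Chars.split₀ s.toList) [] msg.toList)

-- ===== PORT B =====
-- parse phase: tag list with a pending_on flag
def wrapB_tags : List (List Char) → Bool → List (List Char)
  | [], _ => []
  | w :: ws, pending =>
    if w = ['o', 'n'] then wrapB_tags ws true
    else (if pending then ['o', 'n', ' '] ++ w else w) :: wrapB_tags ws false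

def wrap_in_markup_style_alt (msg : String) (style : Option String) : String :=
  match style with
  | none => msg
  | some s =>
    if (PySem.Chars.strip s.toList).length = 0 then msg
    else
      let tags := wrapB_tags (PySem.Chars.split₀ s.toList) false
      let opens := (tags.reverse.map (fun t => ['['] ++ t ++ [']'])).flatten
      let closes := (tags.map (fun t => ['[', '/'] ++ t ++ [']'])).flatten
      String.ofList (opens ++ msg.toList ++ closes)

-- ===== PRECONDITION & SPEC =====
def Spec_wrap_in_markup_style (msg : String) (style : Option String) (out : String) : Prop := out = wrap_in_markup_style_alt msg style
instance (msg : String) (style : Option String) (out : String) : Decidable (Spec_wrap_in_markup_style msg style out) := by unfold Spec_wrap_in_markup_style; infer_instance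

-- ===== CLAIM (what is proved, stated in full; the proofs are below) =====
def Claim_equal_wrap_in_markup_style : Prop := ∀ (msg : String) (style : Option String), Dom_wrap_in_markup_style msg style → Spec_wrap_in_markup_style msg style (wrap_in_markup_style msg style)

-- ===== LEMMAS AND PROOFS =====

-- a word produced by str.split() is nonempty and whitespace-free
def pvOkWord (w : List Char) : Prop := w ≠ [] ∧ ∀ c ∈ w, PySem.Chars.isspace c = false

lemma split₀_go_ok : ∀ (s cur : List Char) (acc : List (List Char)),
    (∀ c ∈ cur, PySem.Chars.isspace c = false) → (∀ w ∈ acc, pvOkWord w) →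
    ∀ w ∈ PySem.Chars.split₀.go s cur acc, pvOkWord w := by
  intro s
  induction s with
  | nil =>
    intro cur acc hcur hacc w hw
    simp only [PySem.Chars.split₀.go] at hw
    split at hw
    · exact hacc w (List.mem_reverse.mp hw)
    · rcases List.mem_cons.mp (List.mem_reverse.mp hw) with h | h
      · subst h
        rename_i hne
        refine ⟨by simpa using fun h => hne (by simp [h]), ?_⟩
        intro c hc; exact hcur c (List.mem_reverse.mp hc)
      · exact hacc w h
  | cons c rest ih =>
    intro cur acc hcur hacc w hw
    simp only [PySem.Chars.split₀.go] at hw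
    split at hw
    · split at hw
      · exact ih [] acc (by simp) hacc w hw
      · refine ih [] (cur.reverse :: acc) (by simp) ?_ w hw
        intro v hv
        rcases List.mem_cons.mp hv with h | h
        · subst h
          rename_i hne
          refine ⟨by simpa using fun h => hne (by simp [h]), ?_⟩
          intro d hd; exact hcur d (List.mem_reverse.mp hd)
        · exact hacc v h
    · refine ih (c :: cur) acc ?_ hacc w hw
      intro d hd
      rcases List.mem_cons.mp hd with h | h
      · subst h; rename_i hns; simpa using hns
      · exact hcur d h

lemma split₀_ok (s : List Char) : ∀ w ∈ PySem.Chars.split₀ s, pvOkWord w := by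
  intro w hw
  exact split₀_go_ok s [] [] (by simp) (by simp) w hw

-- dropWhile leaves a whitespace-free list unchanged
lemma dropWhile_nonspace (l : List Char) (h : ∀ c ∈ l, PySem.Chars.isspace c = false) :
    l.dropWhile PySem.Chars.isspace = l := by
  cases l with
  | nil => rfl
  | cons a t => simp [h a List.mem_cons_self]

-- stripping leaves a string with non-space ends unchanged
lemma strip_ok (w : List Char) (h : pvOkWord w) : PySem.Chars.strip ([' '] ++ w) = w := by
  obtain ⟨hne, hall⟩ := h
  simp only [PySem.Chars.strip, PySem.Chars.lstrip, PySem.Chars.rstrip]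
  have h1 : ([' '] ++ w).dropWhile PySem.Chars.isspace = w := by
    simp only [List.singleton_append, List.dropWhile_cons]
    rw [if_pos (by decide)]
    exact dropWhile_nonspace w hall
  rw [h1, dropWhile_nonspace _ (by intro c hc; exact hall c (List.mem_reverse.mp hc)),
    List.reverse_reverse]

lemma strip_on_ok (w : List Char) (h : pvOkWord w) :
    PySem.Chars.strip (['o', 'n'] ++ [' '] ++ w) = ['o', 'n', ' '] ++ w := by
  obtain ⟨hne, hall⟩ := h
  simp only [PySem.Chars.strip, PySem.Chars.lstrip, PySem.Chars.rstrip]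
  have h1 : (['o', 'n'] ++ [' '] ++ w).dropWhile PySem.Chars.isspace = ['o', 'n', ' '] ++ w := by
    simp only [List.cons_append, List.nil_append, List.dropWhile_cons]
    rw [if_neg (by decide)]
  rw [h1]
  obtain ⟨a, t, ht⟩ := List.exists_cons_of_ne_nil (by simpa using hne : w.reverse ≠ [])
  have ha : PySem.Chars.isspace a = false := by
    apply hall; rw [← List.mem_reverse, ht]; simp
  rw [List.reverse_append, ht, List.cons_append, List.dropWhile_cons, if_neg (by simp [ha])]
  rw [← List.cons_append, ← ht, ← List.reverse_append]
  simp

-- main loop correspondence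
lemma loop_eq_tags (ws : List (List Char)) (hws : ∀ w ∈ ws, pvOkWord w) :
    ∀ (pending : Bool) (msg : List Char),
      wrapA_loop ws (if pending then ['o', 'n'] else []) msg =
        ((wrapB_tags ws pending).reverse.map (fun t => ['['] ++ t ++ [']'])).flatten ++ msg ++
          ((wrapB_tags ws pending).map (fun t => ['[', '/'] ++ t ++ [']'])).flatten := by
  induction ws with
  | nil => intro pending msg; simp [wrapA_loop, wrapB_tags]
  | cons w ws ih =>
    intro pending msg
    have hw := hws w (by simp)
    have hws' : ∀ v ∈ ws, pvOkWord v := fun v hv => hws v (by simp [hv])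
    by_cases hon : w = ['o', 'n']
    · simpa [wrapA_loop, wrapB_tags, hon] using ih hws' true msg
    · have hst : PySem.Chars.strip ((if pending then ['o', 'n'] else []) ++ [' '] ++ w) =
          (if pending then ['o', 'n', ' '] ++ w else w) := by
        cases pending with
        | false => simpa using strip_ok w hw
        | true => simpa using strip_on_ok w hw
      have := ih hws' false
        (['['] ++ (if pending then ['o', 'n', ' '] ++ w else w) ++ [']'] ++ msg ++
          ['[', '/'] ++ (if pending then ['o', 'n', ' '] ++ w else w) ++ [']'])
      simp only [wrapA_loop, wrapB_tags, if_neg hon, hst, if_neg Bool.false_ne_true] at this ⊢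
      rw [this]
      simp [List.flatten_append]

-- ===== VERDICT (by name: the statement is the Claim_ definition above) =====
theorem wrap_in_markup_style_spec : Claim_equal_wrap_in_markup_style := by
  intro msg style _
  unfold Spec_wrap_in_markup_style wrap_in_markup_style wrap_in_markup_style_alt
  cases style with
  | none => rfl
  | some s =>
    simp only
    split
    · rfl
    · have h := loop_eq_tags (PySem.Chars.split₀ s.toList) (split₀_ok s.toList) false msg.toList
      simp only [if_neg Bool.false_ne_true] at h
      simp [h]
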